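-- pv_equiv track=rewrite | github.com/leifwritescode/Advent | event-24/9.12.2024.py | cache_free_spans
-- ===== SOURCE A (Python) =====
-- def find_contiguous_span_of(value, array):
--     """
--     Given an array and a value, find the start and length of the first contiguous block
--     of the value in the array
--
--     Might throw.
--     """
--     start = -1
--     try:
--         start = array.index(value)
--     except:
--         return (-1, -1)
--
--     run = 1
--     while start + run < len(array) and array[start + run] == value:
--         run +=1
--
--     return (start, run)
--
-- def cache_free_spans(storage):
--     """
--     Given a storage array, caches the results of find_contiguous_span_of across the full storage
--     """
--     cached_spans = { }
--
--     offset = 0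
--     span = find_contiguous_span_of(-1, storage[offset:])
--     while span[0] != -1:
--         cached_spans[offset + span[0]] = span[1]
--
--         offset += span[0] + span[1]
--         span = find_contiguous_span_of(-1, storage[offset:])
--
--     return cached_spans
-- ===== SOURCE B (Python) =====
-- def cache_free_spans(storage):
--     """
--     Given a storage array, caches the results of find_contiguous_span_of across the full storage
--     """
--     spans = {}
--     run_start = None
--     for i, v in enumerate(storage):
--         if v == -1:
--             if run_start is None:
--                 run_start = i
--             spans[run_start] = i - run_start + 1
--         else:
--             run_start = None
--     return spans
-- ===== Notes on version B (the rewrite author's own statement) =====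
-- stated objective: alternative
-- what changed: A repeatedly slices the array and rescans the suffix with list.index plus an inner run-counting loop; B makes a single enumerate pass that tracks the start of the current -1 run and writes each run's length into the dict as it goes.
import Mathlib
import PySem

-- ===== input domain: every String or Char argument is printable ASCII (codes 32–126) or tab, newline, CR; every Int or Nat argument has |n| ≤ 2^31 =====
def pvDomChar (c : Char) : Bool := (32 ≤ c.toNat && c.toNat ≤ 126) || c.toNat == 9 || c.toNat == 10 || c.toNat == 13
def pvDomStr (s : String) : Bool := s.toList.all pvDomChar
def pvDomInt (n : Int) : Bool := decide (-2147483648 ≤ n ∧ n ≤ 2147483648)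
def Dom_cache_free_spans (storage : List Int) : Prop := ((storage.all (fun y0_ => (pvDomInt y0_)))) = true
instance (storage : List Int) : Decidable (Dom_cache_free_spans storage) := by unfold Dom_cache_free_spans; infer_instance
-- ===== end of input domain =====

-- B replaces A's repeated slice-and-index rescans by one linear left-to-right pass tracking the current run's start; same dict result.

-- ===== PORT A =====
-- the while loop of find_contiguous_span_of; fuel = array.length bounds the iterations (run grows only while start+run < len)
def pvRunWhile (array : List Int) (value : Int) (start : Int) : Nat → Int → Int
  | 0, run => run
  | fuel+1, run =>
    if start + run < (array.length : Int) ∧ PySem.List.pyGet? array (start + run) = some value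
    then pvRunWhile array value start fuel (run + 1)
    else run

def find_contiguous_span_of (value : Int) (array : List Int) : Int × Int :=
  match PySem.List.index? array value with
  | none => (-1, -1)
  | some start => ((start : Int), pvRunWhile array value (start : Int) array.length 1)

-- A's outer while loop; fuel = storage.length + 1 suffices since offset strictly grows by span[0]+span[1] ≥ 1
def pvALoop (storage : List Int) : Nat → Int → PySem.Dict Int Int → PySem.Dict Int Int
  | 0, _, acc => acc
  | fuel+1, offset, acc =>
    let span := find_contiguous_span_of (-1) (PySem.List.slice storage (some offset) none)
    if span.1 = -1 then acc
    else pvALoop storage fuel (offset + span.1 + span.2) (acc.insert (offset + span.1) span.2)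

def cache_free_spans (storage : List Int) : List (Int × Int) :=
  (pvALoop storage (storage.length + 1) 0 PySem.Dict.empty).items

-- ===== PORT B =====
-- one fold step of B's 'for i, v in enumerate(storage)' loop
def pvStep (st : PySem.Dict Int Int × Option Int) (p : Int × Int) : PySem.Dict Int Int × Option Int :=
  if p.2 = -1 then
    match st.2 with
    | none => (st.1.insert p.1 1, some p.1)
    | some s => (st.1.insert s (p.1 - s + 1), some s)
  else (st.1, none)

def cache_free_spans_alt (storage : List Int) : List (Int × Int) :=
  ((PySem.List.enumerate storage 0).foldl pvStep (PySem.Dict.empty, none)).1.items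

-- ===== PRECONDITION & SPEC =====
def Spec_cache_free_spans (storage : List Int) (out : List (Int × Int)) : Prop := out = cache_free_spans_alt storage
instance (storage : List Int) (out : List (Int × Int)) : Decidable (Spec_cache_free_spans storage out) := by unfold Spec_cache_free_spans; infer_instance

-- ===== CLAIM (what is proved, stated in full; the proofs are below) =====
def Claim_equal_cache_free_spans : Prop := ∀ (storage : List Int), Dom_cache_free_spans storage → Spec_cache_free_spans storage (cache_free_spans storage)

-- ===== LEMMAS AND PROOFS =====

-- structural form of B's fold, carrying the running index explicitly
def gFold : List Int → Int → (PySem.Dict Int Int × Option Int) → (PySem.Dict Int Int × Option Int)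
  | [], _, st => st
  | v :: tl, i, st => gFold tl (i + 1) (pvStep st (i, v))

theorem foldl_enumerate_eq_gFold (l : List Int) : ∀ (i : Int) (st : PySem.Dict Int Int × Option Int),
    (PySem.List.enumerate l i).foldl pvStep st = gFold l i st := by
  induction l with
  | nil => intro i st; simp [PySem.List.enumerate_nil, gFold]
  | cons v tl ih => intro i st; simp [PySem.List.enumerate_cons, gFold, ih]

theorem gFold_append (a : List Int) : ∀ (b : List Int) (i : Int) (st : PySem.Dict Int Int × Option Int),
    gFold (a ++ b) i st = gFold b (i + a.length) (gFold a i st) := by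
  induction a with
  | nil => intro b i st; simp [gFold]
  | cons v tl ih =>
      intro b i st
      simp only [List.cons_append, gFold, ih, List.length_cons]
      congr 1; push_cast; ring

theorem gFold_clean (l : List Int) : ∀ (i : Int) (d : PySem.Dict Int Int),
    (∀ v ∈ l, v ≠ -1) → gFold l i (d, none) = (d, none) := by
  induction l with
  | nil => intro i d _; rfl
  | cons v tl ih =>
      intro i d h
      have hv : v ≠ -1 := h v (by simp)
      simp only [gFold, pvStep, hv, if_neg (by simp [hv] : ¬ ((i,v).2 = -1))]
      exact ih (i + 1) d (fun w hw => h w (by simp [hw]))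

theorem gFold_run_some (r : List Int) : ∀ (j s : Int) (d : PySem.Dict Int Int),
    (∀ v ∈ r, v = -1) → r ≠ [] →
    gFold r j (d, some s) = (d.insert s (j - s + r.length), some s) := by
  induction r with
  | nil => intro j s d _ hne; exact absurd rfl hne
  | cons v tl ih =>
      intro j s d hr _
      have hv : v = -1 := hr v (by simp)
      subst hv
      simp only [gFold, pvStep, eq_self_iff_true, if_true]
      rcases Decidable.em (tl = []) with htl | htl
      · subst htl; simp [gFold]
      · rw [ih (j + 1) s _ (fun w hw => hr w (by simp [hw])) htl,
            PySem.Dict.insert_insert_self]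
        have : j + 1 - s + (tl.length : Int) = j - s + ((((-1:Int) :: tl)).length : Int) := by
          simp; push_cast; ring
        rw [this]

theorem gFold_run_none (r : List Int) (j : Int) (d : PySem.Dict Int Int)
    (hr : ∀ v ∈ r, v = -1) (hne : r ≠ []) :
    gFold r j (d, none) = (d.insert j r.length, some j) := by
  cases r with
  | nil => exact absurd rfl hne
  | cons v tl =>
      have hv : v = -1 := hr v (by simp)
      subst hv
      simp only [gFold, pvStep, eq_self_iff_true, if_true]
      rcases Decidable.em (tl = []) with htl | htl
      · subst htl; simp [gFold]
      · rw [gFold_run_some tl (j + 1) j _ (fun w hw => hr w (by simp [hw])) htl,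
            PySem.Dict.insert_insert_self]
        have : j + 1 - j + (tl.length : Int) = ((((-1:Int) :: tl)).length : Int) := by
          simp; push_cast; ring
        rw [this]

theorem gFold_fst_of_head_ne (t : List Int) (i : Int) (d : PySem.Dict Int Int) (o : Option Int)
    (ht : ∀ w ∈ t.head?, w ≠ -1) :
    (gFold t i (d, o)).1 = (gFold t i (d, none)).1 := by
  cases t with
  | nil => rfl
  | cons w t' =>
      have hw : w ≠ -1 := ht w (by simp)
      simp [gFold, pvStep, hw]

theorem runWhile_run (p r t : List Int)
    (hr : ∀ v ∈ r, v = -1) (ht : ∀ w ∈ t.head?, w ≠ -1) :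
    ∀ (fuel k : Nat), 1 ≤ k → k ≤ r.length → r.length - k ≤ fuel →
    pvRunWhile (p ++ r ++ t) (-1) (p.length : Int) fuel (k : Int) = (r.length : Int) := by
  intro fuel
  induction fuel with
  | zero =>
      intro k h1 h2 h3
      have hk : k = r.length := by omega
      subst hk
      simp [pvRunWhile]
  | succ fuel ih =>
      intro k h1 h2 h3
      rw [pvRunWhile]
      by_cases hk : k = r.length
      · subst hk
        rw [if_neg]
        rintro ⟨hlt, hget⟩
        cases t with
        | nil =>
            simp only [List.append_nil, List.length_append] at hlt
            push_cast at hlt; omega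
        | cons w t' =>
            have hw : w ≠ -1 := ht w (by simp)
            have hcast : (p.length : Int) + (r.length : Int) = (((p ++ r).length : Nat) : Int) := by
              push_cast [List.length_append]; ring
            rw [hcast, PySem.List.pyGet?_natCast] at hget
            rw [List.getElem?_append_right (Nat.le_refl _)] at hget
            simp at hget
            exact hw hget
      · have hklt : k < r.length := by omega
        rw [if_pos]
        · have hc : (k : Int) + 1 = ((k + 1 : Nat) : Int) := by push_cast; ring
          rw [hc]
          exact ih (k + 1) (by omega) (by omega) (by omega)
        · constructor
          · simp only [List.length_append]
            push_cast; omega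
          · have hcast : (p.length : Int) + (k : Int) = (((p.length + k : Nat)) : Int) := by
              push_cast; ring
            rw [hcast, PySem.List.pyGet?_natCast]
            rw [List.getElem?_append_left (by simp; omega),
                List.getElem?_append_right (by omega)]
            have : p.length + k - p.length = k := by omega
            rw [this, List.getElem?_eq_getElem hklt]
            exact congrArg some (hr _ (List.getElem_mem hklt))

theorem find_decomp (p r t : List Int)
    (hp : ∀ v ∈ p, v ≠ -1) (hr : ∀ v ∈ r, v = -1) (hrne : r ≠ [])
    (ht : ∀ w ∈ t.head?, w ≠ -1) :
    find_contiguous_span_of (-1) (p ++ r ++ t) = ((p.length : Int), (r.length : Int)) := by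
  have hidx : PySem.List.index? (p ++ r ++ t) (-1) = some p.length := by
    obtain ⟨v, r', rfl⟩ : ∃ v r', r = v :: r' := by
      cases r with
      | nil => exact absurd rfl hrne
      | cons a b => exact ⟨a, b, rfl⟩
    have hv : v = -1 := hr v (by simp)
    subst hv
    exact (PySem.List.index?_eq_some_iff _ _ _).mpr
      ⟨p, r' ++ t, by simp, rfl, fun hm => (hp _ hm) rfl⟩
  have hrun := runWhile_run p r t hr ht (p ++ r ++ t).length 1 (Nat.le_refl 1)
    (by cases r with | nil => exact absurd rfl hrne | cons a b => simp)
    (by simp [List.length_append]; omega)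
  simp only [find_contiguous_span_of, hidx]
  rw [show ((1 : Nat) : Int) = 1 from rfl] at hrun
  rw [hrun]

theorem split3 (l : List Int) :
    (∀ v ∈ l, v ≠ -1) ∨ ∃ p r t, l = p ++ r ++ t ∧ (∀ v ∈ p, v ≠ -1) ∧
      (∀ v ∈ r, v = -1) ∧ r ≠ [] ∧ (∀ w ∈ t.head?, w ≠ -1) := by
  induction l with
  | nil => left; simp
  | cons v tl ih =>
      by_cases hv : v = -1
      · subst hv
        right
        rcases ih with hall | ⟨p, r, t, hdec, hp, hr, hrne, ht⟩
        · refine ⟨[], [-1], tl, by simp, by simp, by simp, by simp, ?_⟩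
          cases tl with
          | nil => simp
          | cons w tw =>
              intro w' hw'; simp at hw'; subst hw'; exact hall _ (by simp)
        · cases p with
          | nil =>
              refine ⟨[], -1 :: r, t, by simpa using hdec, by simp, ?_, by simp, ht⟩
              intro w hw
              rcases List.mem_cons.mp hw with h | h
              · exact h
              · exact hr _ h
          | cons w p' =>
              have hw : w ≠ -1 := hp w (by simp)
              refine ⟨[], [-1], (w :: p') ++ r ++ t, by simp [hdec], by simp, by simp,
                by simp, ?_⟩
              intro w' hw'; simp at hw'; subst hw'; exact hw
      · rcases ih with hall | ⟨p, r, t, hdec, hp, hr, hrne, ht⟩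
        · left
          intro x hx
          rcases List.mem_cons.mp hx with h | h
          · exact h ▸ hv
          · exact hall _ h
        · right
          refine ⟨v :: p, r, t, by simp [hdec], ?_, hr, hrne, ht⟩
          intro x hx
          rcases List.mem_cons.mp hx with h | h
          · exact h ▸ hv
          · exact hp _ h

theorem main_loop (storage : List Int) : ∀ (fuel i : Nat) (d : PySem.Dict Int Int),
    (storage.drop i).length < fuel →
    pvALoop storage fuel ((i : Nat) : Int) d = (gFold (storage.drop i) ((i : Nat) : Int) (d, none)).1 := by
  intro fuel
  induction fuel with
  | zero => intro i d h; omega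
  | succ fuel ih =>
      intro i d h
      rw [pvALoop, PySem.List.slice_from_natCast]
      rcases split3 (storage.drop i) with hall | ⟨p, r, t, hdecomp, hp, hr, hrne, ht⟩
      · have hidx : PySem.List.index? (storage.drop i) (-1) = none :=
          (PySem.List.index?_eq_none_iff _ _).mpr (fun hm => hall _ hm rfl)
        have hspan : find_contiguous_span_of (-1) (storage.drop i) = (-1, -1) := by
          simp only [find_contiguous_span_of, hidx]
        rw [hspan, gFold_clean (storage.drop i) ((i : Nat) : Int) d hall]
        simp
      · have hfind := find_decomp p r t hp hr hrne ht
        rw [hdecomp, hfind]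
        have hne : ¬ (((p.length : Int), (r.length : Int)).1 = -1) := by simp
        rw [if_neg hne]
        have hrlen : 1 ≤ r.length := by
          cases r with
          | nil => exact absurd rfl hrne
          | cons a b => simp
        have hdrop : storage.drop (i + (p.length + r.length)) = t := by
          rw [← List.drop_drop, hdecomp]
          simpa using List.drop_left (l₁ := p ++ r) (l₂ := t)
        have hlt : (storage.drop (i + (p.length + r.length))).length < fuel := by
          rw [hdrop]
          rw [hdecomp] at h
          simp at h
          omega
        have hcast : ((i : Nat) : Int) + (p.length : Int) + (r.length : Int)
            = (((i + (p.length + r.length) : Nat)) : Int) := by push_cast; ring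
        rw [hcast, ih (i + (p.length + r.length)) _ hlt, hdrop]
        rw [gFold_append, gFold_append,
            gFold_clean p _ d hp,
            gFold_run_none r _ d hr hrne]
        conv_rhs => rw [gFold_fst_of_head_ne t _ _ _ ht]
        have hidx2 : (((i + (p.length + r.length) : Nat)) : Int)
            = ((i : Nat) : Int) + (p.length : Int) + (r.length : Int) := by push_cast; ring
        have harg : ((i : Nat) : Int) + (((p ++ r).length : Nat) : Int)
            = ((i : Nat) : Int) + (p.length : Int) + (r.length : Int) := by
          push_cast [List.length_append]; ring
        rw [hidx2, harg]

-- ===== VERDICT (by name: the statement is the Claim_ definition above) =====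
theorem cache_free_spans_spec : Claim_equal_cache_free_spans := by
  intro storage _
  unfold Spec_cache_free_spans cache_free_spans cache_free_spans_alt
  rw [foldl_enumerate_eq_gFold]
  have h := main_loop storage (storage.length + 1) 0 PySem.Dict.empty (by simp)
  simpa using congrArg PySem.Dict.items h
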